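-- pv_equiv track=rewrite | github.com/HernandoJunior/projetos-cs-c-py | Python/dna.py | contar_repeticoes_consecutivas
-- ===== SOURCE A (Python) =====
-- def contar_repeticoes_consecutivas(sequencia, str_nome):
--     # Implementação simples para contar repetições consecutivas de uma string em outra
--     count = 0
--     max_count = 0
--     for i in range(len(sequencia)):
--         if sequencia[i:i+len(str_nome)] == str_nome:
--             count += 1
--             max_count = max(max_count, count)
--         else:
--             count = 0
--     return max_count
-- ===== SOURCE B (Python) =====
-- def contar_repeticoes_consecutivas(sequencia, str_nome):
--     # Enumerate occurrence positions with C-level str.find and track the longest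
--     # run of consecutive positions, instead of slicing at every index.
--     n = len(sequencia)
--     best = 0
--     run = 0
--     prev = -2
--     i = sequencia.find(str_nome)
--     while 0 <= i < n:
--         run = run + 1 if i == prev + 1 else 1
--         if run > best:
--             best = run
--         prev = i
--         i = sequencia.find(str_nome, i + 1)
--     return best
-- ===== Notes on version B (the rewrite author's own statement) =====
-- stated objective: faster
-- what changed: Instead of comparing a fresh slice at every index, B enumerates occurrence positions with C-level str.find(start) and tracks the longest run of consecutive positions.
import Mathlib
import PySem

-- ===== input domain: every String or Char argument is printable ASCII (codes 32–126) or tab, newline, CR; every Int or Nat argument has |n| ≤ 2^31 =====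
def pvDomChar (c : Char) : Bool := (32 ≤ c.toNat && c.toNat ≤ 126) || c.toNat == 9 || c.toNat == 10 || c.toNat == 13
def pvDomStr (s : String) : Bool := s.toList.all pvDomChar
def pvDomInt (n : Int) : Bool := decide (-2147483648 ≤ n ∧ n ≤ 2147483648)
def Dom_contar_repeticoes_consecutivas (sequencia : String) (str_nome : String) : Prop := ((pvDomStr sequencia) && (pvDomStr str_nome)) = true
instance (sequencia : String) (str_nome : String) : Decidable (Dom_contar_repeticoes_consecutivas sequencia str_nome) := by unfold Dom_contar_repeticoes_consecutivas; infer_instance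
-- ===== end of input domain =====

-- B replaces A's per-index slice comparison with str.find occurrence jumps plus a
-- longest-run-of-consecutive-positions scan (constant-factor faster in Python).

-- ===== PORT A =====
-- literal port of A: for i in range(len(sequencia)): compare sequencia[i:i+len(str_nome)]
-- with str_nome, keeping (count, max_count)
def contar_repeticoes_consecutivas (sequencia : String) (str_nome : String) : Int :=
  ((PySem.List.pyRange 0 (sequencia.toList.length : Int) 1).foldl
    (fun (st : Int × Int) i =>
      if PySem.List.slice sequencia.toList (some i) (some (i + (str_nome.toList.length : Int)))
          = str_nome.toList then
        (st.1 + 1, max st.2 (st.1 + 1))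
      else (0, st.2)) ((0 : Int), (0 : Int))).2

-- ===== PORT B =====
-- the while loop of Source B; `fuel` only makes the recursion structural (len(sequencia) + 1 always suffices)
def pvAltGo (s p : List Char) (i prev run best : Int) : Nat → Int
  | 0 => best
  | fuel + 1 =>
    if 0 ≤ i ∧ i < (s.length : Int) then
      let run' := if i = prev + 1 then run + 1 else 1
      let best' := if run' > best then run' else best
      pvAltGo s p (PySem.Chars.findFrom s p (i + 1)) i run' best' fuel
    else best

def contar_repeticoes_consecutivas_alt (sequencia : String) (str_nome : String) : Int :=
  pvAltGo sequencia.toList str_nome.toList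
    (PySem.Chars.find sequencia.toList str_nome.toList) (-2) 0 0 (sequencia.toList.length + 1)

-- ===== PRECONDITION & SPEC =====
def Spec_contar_repeticoes_consecutivas (sequencia : String) (str_nome : String) (out : Int) : Prop := out = contar_repeticoes_consecutivas_alt sequencia str_nome
instance (sequencia : String) (str_nome : String) (out : Int) : Decidable (Spec_contar_repeticoes_consecutivas sequencia str_nome out) := by unfold Spec_contar_repeticoes_consecutivas; infer_instance

-- ===== CLAIM (what is proved, stated in full; the proofs are below) =====
def Claim_equal_contar_repeticoes_consecutivas : Prop := ∀ (sequencia : String) (str_nome : String), Dom_contar_repeticoes_consecutivas sequencia str_nome → Spec_contar_repeticoes_consecutivas sequencia str_nome (contar_repeticoes_consecutivas sequencia str_nome)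

-- ===== LEMMAS AND PROOFS =====

-- A's loop, abstracted over the (Nat) index list
def pvALoop (s p : List Char) (L : List Nat) (st : Int × Int) : Int × Int :=
  L.foldl (fun st j =>
    if p <+: s.drop j then (st.1 + 1, max st.2 (st.1 + 1)) else (0, st.2)) st

-- B's loop, abstracted over the increasing list of match positions
def pvBLoop (s : List Char) : List Nat → Int → Int → Int → Int
  | [], _, _, best => best
  | j :: t, prev, run, best =>
    let run' := if (j : Int) = prev + 1 then run + 1 else 1
    pvBLoop s t j run' (if run' > best then run' else best)

lemma pvALoop_cons (s p : List Char) (j : Nat) (L : List Nat) (st : Int × Int) :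
    pvALoop s p (j :: L) st
      = pvALoop s p L (if p <+: s.drop j then (st.1 + 1, max st.2 (st.1 + 1)) else (0, st.2)) := rfl

lemma pvBLoop_cons (s : List Char) (j : Nat) (t : List Nat) (prev run best : Int) :
    pvBLoop s (j :: t) prev run best
      = pvBLoop s t j (if (j : Int) = prev + 1 then run + 1 else 1)
          (if (if (j : Int) = prev + 1 then run + 1 else 1) > best
           then (if (j : Int) = prev + 1 then run + 1 else 1) else best) := rfl

lemma pv_slice_test (s p : List Char) (j : Nat) :
    (PySem.List.slice s (some (j : Int)) (some ((j : Int) + (p.length : Int))) = p)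
      ↔ p <+: s.drop j := by
  rw [PySem.List.slice_natCast_add]
  constructor
  · intro h; exact h ▸ List.take_prefix _ _
  · intro h; exact ((List.prefix_iff_eq_take).1 h).symm

lemma pv_prefix_drop_infix {p s : List Char} {j k : Nat} (hk : k ≤ j)
    (h : p <+: s.drop j) : p <:+: s.drop k := by
  have heq : s.drop j = (s.drop k).drop (j - k) := by
    rw [List.drop_drop]; congr 1; omega
  rw [heq] at h
  exact h.isInfix.trans (List.drop_suffix _ _).isInfix

-- the A-loop over an index interval equals the B-loop over its matching positions
lemma pv_loop_eq (s p : List Char) :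
    ∀ (k a : Nat) (cnt best prev run : Int),
      ((prev + 1 = (a : Int)) → cnt = run) →
      ((prev + 1 ≠ (a : Int)) → cnt = 0) →
      prev < (a : Int) →
      (pvALoop s p (List.range' a k 1) (cnt, best)).2
        = pvBLoop s ((List.range' a k 1).filter (fun j => decide (p <+: s.drop j)))
            prev run best := by
  intro k
  induction k with
  | zero => intro a cnt best prev run _ _ _; simp [pvALoop, pvBLoop]
  | succ k ih =>
    intro a cnt best prev run h1 h2 h3
    rw [List.range'_succ]
    by_cases hm : p <+: s.drop a
    · have hrun' : (if (a : Int) = prev + 1 then run + 1 else 1) = cnt + 1 := by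
        by_cases he : (a : Int) = prev + 1
        · rw [if_pos he, h1 he.symm]
        · rw [if_neg he, h2 (fun h => he h.symm)]; norm_num
      have hmax : max best (cnt + 1) = if cnt + 1 > best then cnt + 1 else best := by
        by_cases h : cnt + 1 > best
        · rw [if_pos h, max_eq_right (le_of_lt h)]
        · rw [if_neg h, max_eq_left (by omega)]
      rw [pvALoop_cons, if_pos hm, List.filter_cons, if_pos (by simpa using hm),
        pvBLoop_cons, hrun']
      simp only
      rw [hmax]
      exact ih (a + 1) (cnt + 1) _ (a : Int) (cnt + 1)
        (fun _ => rfl)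
        (fun h => absurd (show ((a : Int) + 1) = ((a + 1 : Nat) : Int) by push_cast; ring) h)
        (by push_cast; omega)
    · rw [pvALoop_cons, if_neg hm, List.filter_cons, if_neg (by simpa using hm)]
      exact ih (a + 1) 0 best prev run
        (fun h => absurd h (by push_cast; omega))
        (fun _ => rfl)
        (by push_cast; omega)

-- B's find-driven recursion consumes exactly the matching positions ≥ start
lemma pv_go_eq (s p : List Char) :
    ∀ (fuel start : Nat) (prev run best : Int), start ≤ s.length →
      s.length - start < fuel →
      pvAltGo s p (PySem.Chars.findFrom s p (start : Int)) prev run best fuel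
        = pvBLoop s ((List.range' start (s.length - start) 1).filter
            (fun j => decide (p <+: s.drop j))) prev run best := by
  intro fuel
  induction fuel with
  | zero => intro start prev run best _ h; omega
  | succ fuel ih =>
    intro start prev run best hle hf
    set j := PySem.Chars.findFrom s p (start : Int) with hj
    by_cases hcond : 0 ≤ j ∧ j < (s.length : Int)
    · -- a match at j.toNat, and no match in [start, j.toNat)
      have hne : j ≠ -1 := by omega
      obtain ⟨hsj, hpre, hmin⟩ := PySem.Chars.findFrom_natCast_spec s p start hle hne
      rw [← hj] at hsj hpre hmin
      have hjn : j.toNat < s.length := by omega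
      have hsjn : start ≤ j.toNat := by omega
      have hlen : s.length - start = (j.toNat - start) + (1 + (s.length - (j.toNat + 1))) := by
        omega
      have hsplit : List.range' start (s.length - start) 1
          = List.range' start (j.toNat - start) 1
            ++ List.range' j.toNat (1 + (s.length - (j.toNat + 1))) 1 := by
        rw [hlen, ← List.range'_append,
          show start + 1 * (j.toNat - start) = j.toNat by omega]
      have hfilt1 : (List.range' start (j.toNat - start) 1).filter
          (fun j' => decide (p <+: s.drop j')) = [] := by
        rw [List.filter_eq_nil_iff]
        intro x hx
        rw [List.mem_range'_1] at hx
        simp only [decide_eq_true_eq]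
        exact hmin x hx.1 (by omega)
      have hstep : List.range' j.toNat (1 + (s.length - (j.toNat + 1))) 1
          = j.toNat :: List.range' (j.toNat + 1) (s.length - (j.toNat + 1)) 1 := by
        rw [Nat.add_comm 1, List.range'_succ]
      rw [hsplit, List.filter_append, hfilt1, List.nil_append, hstep, List.filter_cons,
        if_pos (by simpa using hpre), pvBLoop_cons]
      conv_lhs => rw [pvAltGo]
      rw [if_pos hcond]
      simp only
      have hjcast : ((j.toNat : Int)) = j := Int.toNat_of_nonneg hcond.1
      rw [show j + 1 = ((j.toNat + 1 : Nat) : Int) by push_cast; omega]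
      rw [show j = ((j.toNat : Nat) : Int) from hjcast.symm]
      exact ih (j.toNat + 1) _ _ _ (by omega) (by omega)
    · -- no match at any index in [start, s.length)
      have hfilt : (List.range' start (s.length - start) 1).filter
          (fun j' => decide (p <+: s.drop j')) = [] := by
        rw [List.filter_eq_nil_iff]
        intro x hx
        rw [List.mem_range'_1] at hx
        simp only [decide_eq_true_eq]
        by_cases hne : j = -1
        · rw [hj] at hne
          have hno := (PySem.Chars.findFrom_natCast_eq_neg_one_iff s p start hle).1 hne
          intro hpref
          exact hno (pv_prefix_drop_infix hx.1 hpref)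
        · obtain ⟨hsj, _, hmin⟩ :=
            PySem.Chars.findFrom_natCast_spec s p start hle (hj ▸ hne)
          rw [← hj] at hsj hmin
          have h0j : 0 ≤ j := le_trans (by omega) hsj
          have hnj : (s.length : Int) ≤ j := by omega
          exact hmin x hx.1 (by omega)
      rw [hfilt]
      conv_lhs => rw [pvAltGo]
      rw [if_neg hcond]
      rfl

-- A's fold is the abstract A-loop over List.range'
lemma pv_A_eq (sequencia str_nome : String) :
    contar_repeticoes_consecutivas sequencia str_nome
      = (pvALoop sequencia.toList str_nome.toList
          (List.range' 0 sequencia.toList.length 1) (0, 0)).2 := by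
  unfold contar_repeticoes_consecutivas pvALoop
  rw [PySem.List.pyRange_zero_natCast, List.foldl_map, ← List.range_eq_range']
  congr 1
  apply PySem.List.foldl_congr_mem
  intro st x _
  by_cases h : str_nome.toList <+: sequencia.toList.drop x
  · rw [if_pos ((pv_slice_test _ _ _).2 h), if_pos h]
  · rw [if_neg (fun hc => h ((pv_slice_test _ _ _).1 hc)), if_neg h]

-- ===== VERDICT (by name: the statement is the Claim_ definition above) =====
theorem contar_repeticoes_consecutivas_spec : Claim_equal_contar_repeticoes_consecutivas := by
  intro sequencia str_nome _
  unfold Spec_contar_repeticoes_consecutivas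
  rw [pv_A_eq]
  unfold contar_repeticoes_consecutivas_alt
  have hgo := pv_go_eq sequencia.toList str_nome.toList (sequencia.toList.length + 1) 0
    (-2) 0 0 (Nat.zero_le _) (by omega)
  rw [Nat.cast_zero, PySem.Chars.findFrom_zero, Nat.sub_zero] at hgo
  rw [hgo]
  exact pv_loop_eq sequencia.toList str_nome.toList sequencia.toList.length 0 0 0 (-2) 0
    (by intro h; omega) (fun _ => rfl) (by omega)
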